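-- pv_equiv track=rewrite | github.com/wradlib/wradlib | wradlib/io/radolan.py | get_radolan_header_token_pos
-- ===== SOURCE A (Python) =====
-- def get_dx_header_token():
--     """Return array with known header token of dx data
--
--     Returns
--     -------
--     head : dict
--         with known header token, value set to None
--     """
--     head = {
--         "BY": None,
--         "VS": None,
--         "CO": None,
--         "CD": None,
--         "CS": None,
--         "EP": None,
--         "MS": None,
--     }
--     return head
--
-- def get_radolan_header_token():
--     """Return array with known header token of radolan composites
--
--     Returns
--     -------
--     head : dict
--         with known header token, value set to None
--     """
--     head = {
--         "BY": None,
--         "VS": None,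
--         "SW": None,
--         "PR": None,
--         "INT": None,
--         "GP": None,
--         "MS": None,
--         "LV": None,
--         "CS": None,
--         "MX": None,
--         "BG": None,
--         "ST": None,
--         "VV": None,
--         "MF": None,
--         "QN": None,
--         "VR": None,
--         "U": None,
--     }
--     return head
--
-- def get_radolan_header_token_pos(header, mode="composite"):
--     """Get Token and positions from DWD radolan header
--
--     Parameters
--     ----------
--     header : str
--         (ASCII header)
--
--     Keyword Arguments
--     -----------------
--     mode : str
--         'composite' or 'dx', defaults to 'composite'
--
--     Returns
--     -------
--     head : dict
--         with found header tokens and positions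
--     """
--
--     if mode == "composite":
--         head_dict = get_radolan_header_token()
--     elif mode == "dx":
--         head_dict = get_dx_header_token()
--     else:
--         raise ValueError(
--             f"unknown mode {mode}, use either 'composite' or 'dx' depending on data source"
--         )
--
--     for token in head_dict.keys():
--         d = header.rfind(token)
--         if d > -1:
--             head_dict[token] = d
--     head = {}
--
--     result_dict = {}
--     result_dict.update((k, v) for k, v in head_dict.items() if v is not None)
--     for k, v in head_dict.items():
--         if v is not None:
--             start = v + len(k)
--             filt = [x for x in result_dict.values() if x > v]
--             if filt:
--                 stop = min(filt)
--             else: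
--                 stop = len(header)
--             head[k] = (start, stop)
--         else:
--             head[k] = v
--
--     return head
-- ===== SOURCE B (Python) =====
-- def _bisect_right(a, x):
--     lo, hi = 0, len(a)
--     while lo < hi:
--         mid = (lo + hi) // 2
--         if x < a[mid]:
--             hi = mid
--         else:
--             lo = mid + 1
--     return lo
--
--
-- def get_radolan_header_token_pos(header, mode="composite"):
--     if mode == "composite":
--         tokens = ["BY", "VS", "SW", "PR", "INT", "GP", "MS", "LV", "CS",
--                   "MX", "BG", "ST", "VV", "MF", "QN", "VR", "U"]
--     elif mode == "dx":
--         tokens = ["BY", "VS", "CO", "CD", "CS", "EP", "MS"]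
--     else:
--         raise ValueError(
--             f"unknown mode {mode}, use either 'composite' or 'dx' depending on data source"
--         )
--     pos = [(t, header.rfind(t)) for t in tokens]
--     found = sorted(v for _, v in pos if v > -1)
--     head = {}
--     for t, v in pos:
--         if v > -1:
--             i = _bisect_right(found, v)
--             stop = found[i] if i < len(found) else len(header)
--             head[t] = (v + len(t), stop)
--         else:
--             head[t] = None
--     return head
-- ===== Notes on version B (the rewrite author's own statement) =====
-- stated objective: alternative
-- what changed: B replaces A's dict bookkeeping and per-token filter+min rescan over all found positions with one sorted list of found positions and a hand-written bisect_right successor lookup per token.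
import Mathlib
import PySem

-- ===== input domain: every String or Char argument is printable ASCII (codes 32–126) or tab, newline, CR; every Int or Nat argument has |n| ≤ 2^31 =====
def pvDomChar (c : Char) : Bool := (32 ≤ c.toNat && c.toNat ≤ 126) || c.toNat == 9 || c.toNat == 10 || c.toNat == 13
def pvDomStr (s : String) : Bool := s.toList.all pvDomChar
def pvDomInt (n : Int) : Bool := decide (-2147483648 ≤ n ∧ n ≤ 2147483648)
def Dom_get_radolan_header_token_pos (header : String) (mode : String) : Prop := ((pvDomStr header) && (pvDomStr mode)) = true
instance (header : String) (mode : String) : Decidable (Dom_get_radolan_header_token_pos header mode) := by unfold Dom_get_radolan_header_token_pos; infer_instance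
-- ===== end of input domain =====

-- B builds the found positions once, sorts them, and finds each token's stop by a
-- bisect_right successor lookup, instead of A's per-token filter+min rescan (alternative).

-- ===== PORT A =====
-- token lists of get_radolan_header_token / get_dx_header_token (dict literals; values all None)
def pvCompositeTokens : List String :=
  ["BY", "VS", "SW", "PR", "INT", "GP", "MS", "LV", "CS", "MX", "BG", "ST", "VV", "MF", "QN", "VR", "U"]

def pvDxTokens : List String :=
  ["BY", "VS", "CO", "CD", "CS", "EP", "MS"]

-- body of A after the mode dispatch; the final Python dict `head` has pairwise-distinct
-- keys (the tokens), so building it is appending pairs in loop order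
def pvPortACore (header : String) (tokens : List String) : List (String × Option (Int × Int)) :=
  -- head_dict = get_radolan_header_token() / get_dx_header_token(): a dict literal, inserts in order
  let head_dict0 : PySem.Dict String (Option Int) :=
    tokens.foldl (fun d t => d.insert t none) PySem.Dict.empty
  -- for token in head_dict.keys(): d = header.rfind(token); if d > -1: head_dict[token] = d
  let head_dict : PySem.Dict String (Option Int) :=
    head_dict0.keys.foldl
      (fun d token =>
        let dd := PySem.Str.rfind header token
        if dd > -1 then d.insert token (some dd) else d)
      head_dict0
  -- result_dict.update((k, v) for k, v in head_dict.items() if v is not None)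
  let result_dict : PySem.Dict String Int :=
    head_dict.items.foldl
      (fun r kv =>
        match kv.2 with
        | some v => r.insert kv.1 v
        | none => r)
      PySem.Dict.empty
  -- for k, v in head_dict.items(): ...
  head_dict.items.foldl
    (fun h kv =>
      match kv.2 with
      | some v =>
        let start := v + PySem.Str.len kv.1
        let filt := result_dict.values.filter (fun x => decide (x > v))
        let stop :=
          match PySem.List.min? filt (fun x => x) with
          | some m => m
          | none => PySem.Str.len header
        h ++ [(kv.1, some (start, stop))]
      | none => h ++ [(kv.1, none)])
    ([] : List (String × Option (Int × Int)))

-- port of A; Pre_ excludes every other mode, on which A raises ValueError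
def get_radolan_header_token_pos (header : String) (mode : String) : List (String × Option (Int × Int)) :=
  pvPortACore header (if mode == "composite" then pvCompositeTokens else pvDxTokens)

-- ===== PORT B =====
-- _bisect_right(a, x) of Source B; `a[mid]` is in range on every call (lo < hi <= len a), so getD is exact,
-- and lo, hi stay nonnegative, so Nat with Nat division matches Python's ints with //
def pvBisectRight (a : List Int) (x : Int) (lo hi : Nat) : Nat :=
  if lo < hi then
    let mid := (lo + hi) / 2
    if x < a.getD mid 0 then pvBisectRight a x lo mid
    else pvBisectRight a x (mid + 1) hi
  else lo
termination_by hi - lo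
decreasing_by all_goals omega

-- body of B after the mode dispatch (token lists are the same data as A's)
def pvPortBCore (header : String) (tokens : List String) : List (String × Option (Int × Int)) :=
  let pos : List (String × Int) := tokens.map (fun t => (t, PySem.Str.rfind header t))
  let found : List Int :=
    PySem.List.sorted ((pos.map (·.2)).filter (fun v => decide (v > -1))) (fun x => x)
  pos.foldl
    (fun h tv =>
      if tv.2 > -1 then
        let i := pvBisectRight found tv.2 0 found.length
        let stop := if i < found.length then found.getD i 0 else PySem.Str.len header
        h ++ [(tv.1, some (tv.2 + PySem.Str.len tv.1, stop))]
      else h ++ [(tv.1, none)])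
    ([] : List (String × Option (Int × Int)))

def get_radolan_header_token_pos_alt (header : String) (mode : String) : List (String × Option (Int × Int)) :=
  pvPortBCore header (if mode == "composite" then pvCompositeTokens else pvDxTokens)

-- ===== PRECONDITION & SPEC =====
-- A raises ValueError whenever mode is not one of its two known data-source modes;
-- Pre_ admits exactly the modes A accepts, so it excludes no input on which A returns.
def Pre_get_radolan_header_token_pos (header : String) (mode : String) : Prop :=
  mode = "composite" ∨ mode = "dx"
instance (header : String) (mode : String) : Decidable (Pre_get_radolan_header_token_pos header mode) := by
  unfold Pre_get_radolan_header_token_pos; infer_instance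

def pvWitness_get_radolan_header_token_pos : String × String := ("BY 12VS 3", "composite")
def Spec_get_radolan_header_token_pos (header : String) (mode : String) (out : List (String × Option (Int × Int))) : Prop := out = get_radolan_header_token_pos_alt header mode
instance (header : String) (mode : String) (out : List (String × Option (Int × Int))) : Decidable (Spec_get_radolan_header_token_pos header mode out) := by unfold Spec_get_radolan_header_token_pos; infer_instance

-- ===== CLAIM (what is proved, stated in full; the proofs are below) =====
def Claim_equal_get_radolan_header_token_pos : Prop := ∀ (header : String) (mode : String), Dom_get_radolan_header_token_pos header mode → Pre_get_radolan_header_token_pos header mode → Spec_get_radolan_header_token_pos header mode (get_radolan_header_token_pos header mode)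

-- ===== LEMMAS AND PROOFS =====

-- the value A's head_dict stores for token t after the rfind loop
def pvPf (header : String) (t : String) : Option Int :=
  if PySem.Str.rfind header t > -1 then some (PySem.Str.rfind header t) else none

-- the rfind-update loop rewrites exactly the entries of the keys it visits
lemma pvL2 (header : String) (ts : List String) (d : PySem.Dict String (Option Int))
    (hnd : d.keys.Nodup) (hts : ts.Nodup)
    (hmem : ∀ t ∈ ts, (t, (none : Option Int)) ∈ d.items) :
    (ts.foldl
      (fun d token =>
        let dd := PySem.Str.rfind header token
        if dd > -1 then d.insert token (some dd) else d) d).items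
      = d.items.map (fun p => if p.1 ∈ ts then (p.1, pvPf header p.1) else p) := by
  induction ts generalizing d with
  | nil => simp
  | cons t ts ih =>
    have hmt : (t, (none : Option Int)) ∈ d.items := hmem t (List.mem_cons_self)
    have hct : d.contains t = true :=
      (PySem.Dict.contains_iff_mem_keys d t).2 (PySem.Dict.mem_keys_of_mem_items d hmt)
    have htn : t ∉ ts := (List.nodup_cons.1 hts).1
    simp only [List.foldl_cons]
    by_cases h : PySem.Str.rfind header t > -1
    · have h' : -1 < PySem.Chars.rfind header.toList t.toList := by simpa using h
      have hstep :
        (let dd := PySem.Str.rfind header t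
         if dd > -1 then d.insert t (some dd) else d)
          = d.insert t (some (PySem.Str.rfind header t)) := by
        simp only [if_pos h]
      rw [hstep, ih (d.insert t (some (PySem.Str.rfind header t)))
            (by rw [PySem.Dict.keys_insert_of_contains d _ hct]; exact hnd)
            (List.nodup_cons.1 hts).2
            (by
              intro t' ht'
              refine (PySem.Dict.mem_items_insert d t _ (t', none)).2
                (Or.inr ⟨hmem t' (List.mem_cons_of_mem _ ht'), ?_⟩)
              intro hEq
              exact absurd (hEq ▸ ht') htn),
          PySem.Dict.items_insert_of_contains d _ hct, List.map_map]
      refine List.map_congr_left ?_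
      intro p hp
      by_cases hpt : p.1 = t
      · simp [Function.comp, hpt, htn, pvPf, h', List.mem_cons]
      · simp [Function.comp, hpt, List.mem_cons]
    · have h' : ¬ (-1 < PySem.Chars.rfind header.toList t.toList) := by simpa using h
      have hstep :
        (let dd := PySem.Str.rfind header t
         if dd > -1 then d.insert t (some dd) else d) = d := by
        simp only [if_neg h]
      rw [hstep, ih d hnd (List.nodup_cons.1 hts).2
            (fun t' ht' => hmem t' (List.mem_cons_of_mem _ ht'))]
      refine List.map_congr_left ?_
      intro p hp
      by_cases hpt : p.1 = t
      · have h1 : d.get? p.1 = some p.2 := by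
          obtain ⟨p1, p2⟩ := p
          exact PySem.Dict.get?_of_mem_items d hp hnd
        have h2 : d.get? t = some none := PySem.Dict.get?_of_mem_items d hmt hnd
        have hp2 : p.2 = none := by
          rw [hpt] at h1; rw [h1] at h2; exact Option.some_inj.1 h2
        have hpe : p = (t, none) := by
          obtain ⟨p1, p2⟩ := p
          simp only at hpt hp2; rw [hpt, hp2]
        simp [hpe, pvPf, h', htn, List.mem_cons]
      · simp [hpt, List.mem_cons]

-- the result_dict loop collects the found positions in order
lemma pvL3 (l : List (String × Option Int)) (d : PySem.Dict String Int)
    (hnd : (l.map Prod.fst).Nodup) (hc : ∀ p ∈ l, d.contains p.1 = false) :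
    (l.foldl
      (fun r kv =>
        match kv.2 with
        | some v => r.insert kv.1 v
        | none => r) d).values
      = d.values ++ l.filterMap Prod.snd := by
  induction l generalizing d with
  | nil => simp
  | cons p l ih =>
    obtain ⟨k, ov⟩ := p
    have hk : ∀ q ∈ l, ¬ (q.1 = k) := by
      intro q hq hEq
      have hq1 : q.1 ∈ l.map Prod.fst := List.mem_map_of_mem hq
      simp only [List.map_cons] at hnd
      exact (List.nodup_cons.1 hnd).1 (hEq ▸ hq1)
    cases ov with
    | none =>
      simp only [List.foldl_cons, List.filterMap_cons]
      exact ih d (List.nodup_cons.1 hnd).2 (fun q hq => hc q (List.mem_cons_of_mem _ hq))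
    | some v =>
      simp only [List.foldl_cons, List.filterMap_cons]
      rw [ih (d.insert k v) (List.nodup_cons.1 hnd).2
            (by
              intro q hq
              rw [PySem.Dict.contains_insert]
              simp only [Bool.or_eq_false_iff]
              exact ⟨by simpa using hk q hq, hc q (List.mem_cons_of_mem _ hq)⟩)]
      have hv : (d.insert k v).values = d.values ++ [v] := by
        simp only [PySem.Dict.values]
        rw [PySem.Dict.items_insert_of_not_contains d v (hc (k, some v) List.mem_cons_self)]
        simp
      rw [hv, List.append_assoc]
      simp

-- found positions, A's way (filterMap of head_dict values) = B's way (filter of raw rfinds)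
lemma pvFound (header : String) (ts : List String) :
    ts.filterMap (pvPf header)
      = (ts.map (fun t => PySem.Str.rfind header t)).filter (fun v => decide (v > -1)) := by
  induction ts with
  | nil => rfl
  | cons t ts ih =>
    rw [List.filterMap_cons, List.map_cons, List.filter_cons]
    by_cases h : PySem.Str.rfind header t > -1
    · have hpv : pvPf header t = some (PySem.Str.rfind header t) := by
        simp only [pvPf, if_pos h]
      have hd : decide (PySem.Str.rfind header t > -1) = true := decide_eq_true h
      rw [hpv, ih, hd]
      rfl
    · have hpv : pvPf header t = none := by
        simp only [pvPf, if_neg h]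
      have hd : decide (PySem.Str.rfind header t > -1) = false := by
        simpa using h
      rw [hpv, ih, hd]
      rfl

-- binary-search invariant of Source B's _bisect_right on a (weakly) sorted list
lemma pvBR_spec_fuel (a : List Int) (x : Int)
    (hmono : ∀ p q : Nat, p ≤ q → q < a.length → a.getD p 0 ≤ a.getD q 0) :
    ∀ (n lo hi : Nat), hi - lo ≤ n → lo ≤ hi → hi ≤ a.length →
      lo ≤ pvBisectRight a x lo hi ∧ pvBisectRight a x lo hi ≤ hi ∧
      (∀ j : Nat, lo ≤ j → j < pvBisectRight a x lo hi → a.getD j 0 ≤ x) ∧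
      (∀ j : Nat, pvBisectRight a x lo hi ≤ j → j < hi → x < a.getD j 0) := by
  intro n
  induction n with
  | zero =>
    intro lo hi h1 h2 h3
    have heq : ¬ lo < hi := by omega
    rw [pvBisectRight, if_neg heq]
    exact ⟨le_refl _, h2, fun j hj1 hj2 => absurd (lt_of_le_of_lt hj1 hj2) (lt_irrefl _),
           fun j hj1 hj2 => absurd (lt_of_le_of_lt hj1 hj2) heq⟩
  | succ n ihn =>
    intro lo hi h1 h2 h3
    by_cases hlt : lo < hi
    · rw [pvBisectRight, if_pos hlt]
      by_cases hx : x < a.getD ((lo + hi) / 2) 0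
      · simp only [if_pos hx]
        obtain ⟨g1, g2, g3, g4⟩ := ihn lo ((lo + hi) / 2) (by omega) (by omega) (by omega)
        refine ⟨g1, by omega, g3, ?_⟩
        intro j hj1 hj2
        by_cases hjm : j < (lo + hi) / 2
        · exact g4 j hj1 hjm
        · calc x < a.getD ((lo + hi) / 2) 0 := hx
            _ ≤ a.getD j 0 := hmono _ j (by omega) (by omega)
      · simp only [if_neg hx]
        obtain ⟨g1, g2, g3, g4⟩ := ihn ((lo + hi) / 2 + 1) hi (by omega) (by omega) h3
        refine ⟨by omega, g2, ?_, g4⟩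
        intro j hj1 hj2
        by_cases hjm : (lo + hi) / 2 + 1 ≤ j
        · exact g3 j hjm hj2
        · calc a.getD j 0 ≤ a.getD ((lo + hi) / 2) 0 := hmono j _ (by omega) (by omega)
            _ ≤ x := le_of_not_gt hx
    · rw [pvBisectRight, if_neg hlt]
      exact ⟨le_refl _, h2, fun j hj1 hj2 => absurd (lt_of_le_of_lt hj1 hj2) (lt_irrefl _),
             fun j hj1 hj2 => absurd (lt_of_le_of_lt hj1 hj2) hlt⟩

lemma pvBR_spec (a : List Int) (x : Int)
    (hmono : ∀ p q : Nat, p ≤ q → q < a.length → a.getD p 0 ≤ a.getD q 0)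
    (lo hi : Nat) (hlh : lo ≤ hi) (hha : hi ≤ a.length) :
    lo ≤ pvBisectRight a x lo hi ∧ pvBisectRight a x lo hi ≤ hi ∧
    (∀ j : Nat, lo ≤ j → j < pvBisectRight a x lo hi → a.getD j 0 ≤ x) ∧
    (∀ j : Nat, pvBisectRight a x lo hi ≤ j → j < hi → x < a.getD j 0) :=
  pvBR_spec_fuel a x hmono (hi - lo) lo hi (le_refl _) hlh hha

-- the per-token stop value: A's min-over-filter equals B's sorted-successor lookup
lemma pvStop (S : List Int) (v L : Int) :
    (match PySem.List.min? (S.filter (fun x => decide (x > v))) (fun x => x) with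
      | some m => m
      | none => L)
    = (let s := PySem.List.sorted S (fun x => x)
       let i := pvBisectRight s v 0 s.length
       if i < s.length then s.getD i 0 else L) := by
  set s := PySem.List.sorted S (fun x => x) with hs
  have hperm : s.Perm S := PySem.List.sorted_perm S (fun x => x) false
  have hmono : ∀ p q : Nat, p ≤ q → q < s.length → s.getD p 0 ≤ s.getD q 0 := by
    intro p q hpq hq
    rw [List.getD_eq_getElem s 0 (by omega), List.getD_eq_getElem s 0 hq]
    exact PySem.List.sorted_id_getElem_mono S hpq hq
  obtain ⟨hi1, hi2, hlow, hhigh⟩ :=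
    pvBR_spec s v hmono 0 s.length (Nat.zero_le _) (le_refl _)
  set i := pvBisectRight s v 0 s.length with hidef
  cases hmin : PySem.List.min? (S.filter (fun x => decide (x > v))) (fun x => x) with
  | none =>
    have hnil : S.filter (fun x => decide (x > v)) = [] :=
      (PySem.List.min?_eq_none_iff _ _).1 hmin
    have hnone : ∀ y ∈ S, ¬ (y > v) := by
      intro y hy hgt
      have hmem : y ∈ S.filter (fun x => decide (x > v)) :=
        List.mem_filter.2 ⟨hy, by simpa⟩
      rw [hnil] at hmem
      exact absurd hmem (List.not_mem_nil)
    have hni : ¬ i < s.length := by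
      intro hlt
      have hv := hhigh i (le_refl _) hlt
      have hmem : s.getD i 0 ∈ S := hperm.mem_iff.1 (by
        rw [List.getD_eq_getElem s 0 hlt]; exact List.getElem_mem hlt)
      exact hnone _ hmem hv
    show L = if i < s.length then s.getD i 0 else L
    rw [if_neg hni]
  | some m =>
    have hmem := PySem.List.min?_mem hmin
    have hmin' := PySem.List.min?_isMin hmin
    have hmS : m ∈ S := (List.mem_filter.1 hmem).1
    have hmv : m > v := by have := (List.mem_filter.1 hmem).2; simpa using this
    obtain ⟨km, hkm, hkmv⟩ := List.getElem_of_mem (hperm.mem_iff.2 hmS)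
    have hikm : i ≤ km := by
      by_contra hcon
      have hle := hlow km (Nat.zero_le _) (by omega)
      rw [List.getD_eq_getElem s 0 hkm, hkmv] at hle
      omega
    have hilen : i < s.length := by omega
    have hgt : s.getD i 0 > v := hhigh i (le_refl _) hilen
    have hle1 : m ≤ s.getD i 0 := by
      have hmemS : s.getD i 0 ∈ S := hperm.mem_iff.1 (by
        rw [List.getD_eq_getElem s 0 hilen]; exact List.getElem_mem hilen)
      exact hmin' _ (List.mem_filter.2 ⟨hmemS, by simpa⟩)
    have hle2 : s.getD i 0 ≤ m := by
      have hm := hmono i km hikm hkm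
      rw [List.getD_eq_getElem s 0 hkm, hkmv] at hm
      exact hm
    show m = if i < s.length then s.getD i 0 else L
    rw [if_pos hilen]
    omega

-- A's final loop appends one pair per item, i.e. is a map over head_dict.items
lemma pvFoldA (header : String) (S : List Int) (l : List (String × Option Int))
    (acc : List (String × Option (Int × Int))) :
    l.foldl
      (fun h kv =>
        match kv.2 with
        | some v =>
          h ++ [(kv.1, some (v + PySem.Str.len kv.1,
            match PySem.List.min? (S.filter (fun x => decide (x > v))) (fun x => x) with
            | some m => m
            | none => PySem.Str.len header))]
        | none => h ++ [(kv.1, none)]) acc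
      = acc ++ l.map (fun kv => (kv.1, kv.2.map (fun v => (v + PySem.Str.len kv.1,
            match PySem.List.min? (S.filter (fun x => decide (x > v))) (fun x => x) with
            | some m => m
            | none => PySem.Str.len header)))) := by
  induction l generalizing acc with
  | nil => simp
  | cons kv l ih =>
    cases h : kv.2 with
    | none => simp only [List.foldl_cons, List.map_cons, h, ih, Option.map_none]; simp
    | some v => simp only [List.foldl_cons, List.map_cons, h, ih, Option.map_some]; simp

-- B's loop likewise is a map over pos
lemma pvFoldB (header : String) (s : List Int) (l : List (String × Int))
    (acc : List (String × Option (Int × Int))) :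
    l.foldl
      (fun h tv =>
        if tv.2 > -1 then
          h ++ [(tv.1, some (tv.2 + PySem.Str.len tv.1,
            if pvBisectRight s tv.2 0 s.length < s.length then
              s.getD (pvBisectRight s tv.2 0 s.length) 0
            else PySem.Str.len header))]
        else h ++ [(tv.1, none)]) acc
      = acc ++ l.map (fun tv => (tv.1,
          if tv.2 > -1 then
            some (tv.2 + PySem.Str.len tv.1,
              if pvBisectRight s tv.2 0 s.length < s.length then
                s.getD (pvBisectRight s tv.2 0 s.length) 0
              else PySem.Str.len header)
          else none)) := by
  induction l generalizing acc with
  | nil => simp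
  | cons tv l ih =>
    by_cases h : tv.2 > -1
    · simp only [List.foldl_cons, List.map_cons, if_pos h, ih]; simp
    · simp only [List.foldl_cons, List.map_cons, if_neg h, ih]; simp

-- the two port bodies agree on any duplicate-free token list
lemma pvMain (header : String) (ts : List String) (hts : ts.Nodup) :
    pvPortACore header ts = pvPortBCore header ts := by
  have h0 : (ts.foldl (fun d t => d.insert t (none : Option Int)) PySem.Dict.empty).items
      = ts.map (fun t => (t, (none : Option Int))) := by
    have h := PySem.Dict.items_foldl_insert_fresh ts (fun t => t) (fun _ => (none : Option Int))
      PySem.Dict.empty (fun a _ => PySem.Dict.contains_empty a) (by simpa using hts)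
    simpa using h
  have hkeys : (ts.foldl (fun d t => d.insert t (none : Option Int)) PySem.Dict.empty).keys
      = ts := by
    simp only [PySem.Dict.keys, h0, List.map_map]
    exact List.map_id ts
  have hnd0 : (ts.foldl (fun d t => d.insert t (none : Option Int)) PySem.Dict.empty).keys.Nodup := by
    rw [hkeys]; exact hts
  have hmem0 : ∀ t ∈ ts,
      (t, (none : Option Int)) ∈ (ts.foldl (fun d t => d.insert t (none : Option Int)) PySem.Dict.empty).items := by
    rw [h0]; intro t ht
    exact List.mem_map_of_mem ht
  have h2 := pvL2 header ts _ hnd0 hts hmem0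
  rw [h0, List.map_map] at h2
  have h2' : (ts.foldl
      (fun d token =>
        let dd := PySem.Str.rfind header token
        if dd > -1 then d.insert token (some dd) else d)
      (ts.foldl (fun d t => d.insert t (none : Option Int)) PySem.Dict.empty)).items
      = ts.map (fun t => (t, pvPf header t)) := by
    rw [h2]
    exact List.map_congr_left (fun t ht => by simp [Function.comp, ht])
  have h3' : ((ts.map (fun t => (t, pvPf header t))).foldl
      (fun r kv =>
        match kv.2 with
        | some v => r.insert kv.1 v
        | none => r) (PySem.Dict.empty : PySem.Dict String Int)).values
      = ts.filterMap (pvPf header) := by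
    rw [pvL3 _ _ (by
        rw [List.map_map]
        show (List.map id ts).Nodup
        rw [List.map_id]
        exact hts) (fun p _ => PySem.Dict.contains_empty p.1)]
    simp [List.filterMap_map, Function.comp, PySem.Dict.empty, PySem.Dict.values]
  simp only [pvPortACore, pvPortBCore]
  rw [hkeys]
  simp only [h2', h3']
  rw [pvFoldA header (ts.filterMap (pvPf header)) _ [], List.nil_append]
  have hmap2 : ((ts.map (fun t => (t, PySem.Str.rfind header t))).map (fun tv => tv.2))
      = ts.map (fun t => PySem.Str.rfind header t) := by
    rw [List.map_map]
    rfl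
  simp only [hmap2]
  rw [← pvFound header ts]
  rw [pvFoldB header (PySem.List.sorted (ts.filterMap (pvPf header)) (fun x => x)) _ [], List.nil_append]
  rw [List.map_map, List.map_map]
  refine List.map_congr_left (fun t ht => ?_)
  simp only [Function.comp]
  by_cases h : PySem.Str.rfind header t > -1
  · have hpv : pvPf header t = some (PySem.Str.rfind header t) := by
      simp only [pvPf, if_pos h]
    rw [hpv, if_pos h, Option.map_some]
    rw [pvStop (ts.filterMap (pvPf header)) (PySem.Str.rfind header t) (PySem.Str.len header)]
  · have hpv : pvPf header t = none := by
      simp only [pvPf, if_neg h]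
    rw [hpv, if_neg h, Option.map_none]


-- ===== VERDICT (by name: the statement is the Claim_ definition above) =====
theorem get_radolan_header_token_pos_spec : Claim_equal_get_radolan_header_token_pos := by
  intro header mode hdom hpre
  unfold Spec_get_radolan_header_token_pos
  unfold get_radolan_header_token_pos get_radolan_header_token_pos_alt
  rcases hpre with h | h <;> subst h
  · have hif : (if (("composite" : String) == "composite") then pvCompositeTokens else pvDxTokens)
        = pvCompositeTokens := rfl
    rw [hif]
    exact pvMain header pvCompositeTokens (by decide)
  · have hif : (if (("dx" : String) == "composite") then pvCompositeTokens else pvDxTokens)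
        = pvDxTokens := rfl
    rw [hif]
    exact pvMain header pvDxTokens (by decide)
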